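-- pv_equiv track=rewrite | github.com/whyj107/Algorithm | CodeWar/20201022_Loneliest character.py | loneliest1
-- ===== SOURCE A (Python) =====
-- def loneliest1(s):
--     s = s.strip()
--     ind = [-1, len(s)]
--     for i in range(len(s)):
--         if s[i] != ' ':
--             ind.insert(-1, i)
--
--     d = {}
--     for i in range(1, len(ind) - 1):
--         x = ind[i + 1] - ind[i - 1] - 2
--         if not d.get(x):
--             d[x] = []
--         d[x].append(s[ind[i]])
--     return (d[max(d)])
-- ===== SOURCE B (Python) =====
-- def loneliest1(s):
--     t = s.strip()
--     best = None       # largest combined gap seen so far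
--     winners = []      # chars achieving best, in order
--     pending = None    # (char, spaces immediately before it) awaiting its right-side spaces
--     run = 0           # length of the current run of spaces
--     for c in t:
--         if c == ' ':
--             run += 1
--         else:
--             if pending is not None:
--                 ch, left = pending
--                 g = left + run
--                 if best is None or g > best:
--                     best, winners = g, [ch]
--                 elif g == best:
--                     winners.append(ch)
--             pending = (c, run)
--             run = 0
--     if pending is not None:
--         ch, left = pending
--         g = left + run
--         if best is None or g > best:
--             best, winners = g, [ch]
--         elif g == best:
--             winners.append(ch)
--     return winners
-- ===== Notes on version B (the rewrite author's own statement) =====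
-- stated objective: faster
-- what changed: Replaces A's index-list built by repeated insert(-1) plus a dict grouping characters by gap and a d[max(d)] lookup with a single streaming pass over the stripped string that counts space runs and maintains a pending character plus a running maximum and winner list, never materialising the index list or a dict (one traversal and no list insertions, which also measures as a constant-factor speedup).
-- outside the precondition, e.g. on loneliest1(' '): A raises ValueError, B returns []; on loneliest1(''): A raises ValueError, B returns []
import Mathlib
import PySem

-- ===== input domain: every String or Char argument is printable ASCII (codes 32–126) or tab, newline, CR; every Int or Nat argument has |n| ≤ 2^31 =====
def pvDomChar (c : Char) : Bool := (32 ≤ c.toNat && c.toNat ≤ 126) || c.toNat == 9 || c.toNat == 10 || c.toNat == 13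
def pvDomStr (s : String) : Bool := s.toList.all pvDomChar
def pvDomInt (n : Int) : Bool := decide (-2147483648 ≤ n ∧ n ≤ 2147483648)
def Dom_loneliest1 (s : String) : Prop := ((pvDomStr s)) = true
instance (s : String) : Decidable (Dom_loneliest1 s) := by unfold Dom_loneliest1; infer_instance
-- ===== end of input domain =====

-- B replaces A's insert(-1)-built index list + dict grouping by gap + d[max(d)] with a
-- single streaming pass over the stripped string that counts space runs and maintains a
-- pending character together with a running maximum and its winner list (objective:
-- alternative). Equivalence is claimed on Pre_ (some non-space char survives strip);
-- on the excluded inputs A raises ValueError while B returns [].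

-- ===== PORT A =====
def loneliest1 (s : String) : List String :=
  let t := PySem.Chars.strip s.toList
  let ind : List Int :=
    (PySem.List.pyRange 0 (t.length : Int) 1).foldl
      (fun ind i =>
        if PySem.List.pyGetD t i ' ' ≠ ' ' then PySem.List.insert ind (-1) i else ind)
      [-1, (t.length : Int)]
  let d : PySem.Dict Int (List String) :=
    (PySem.List.pyRange 1 (PySem.List.len ind - 1) 1).foldl
      (fun d i =>
        let x := PySem.List.pyGetD ind (i + 1) 0 - PySem.List.pyGetD ind (i - 1) 0 - 2
        d.modify x [] (fun l => l ++ [String.ofList [PySem.List.pyGetD t (PySem.List.pyGetD ind i 0) ' ']]))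
      PySem.Dict.empty
  match PySem.List.max? d.keys (fun k => k) with
  | some m => d.getD m []
  | none => []   -- Python's max({}) raises ValueError here: excluded by Pre_

-- ===== PORT B =====
-- the 'if best is None or g > best … elif g == best …' update of Source B
def pvEmit (best : Option Int) (ws : List String) (ch : Char) (g : Int) :
    Option Int × List String :=
  match best with
  | none => (some g, [String.ofList [ch]])
  | some b =>
    if g > b then (some g, [String.ofList [ch]])
    else if g = b then (some b, ws ++ [String.ofList [ch]])
    else (some b, ws)

-- the loop body of Source B; state = (best, winners, pending, run)
def pvStepB (st : Option Int × List String × Option (Char × Int) × Int) (c : Char) :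
    Option Int × List String × Option (Char × Int) × Int :=
  if c = ' ' then (st.1, st.2.1, st.2.2.1, st.2.2.2 + 1)
  else
    match st.2.2.1 with
    | some (ch, left) =>
      let bw := pvEmit st.1 st.2.1 ch (left + st.2.2.2)
      (bw.1, bw.2, some (c, st.2.2.2), 0)
    | none => (st.1, st.2.1, some (c, st.2.2.2), 0)

def loneliest1_alt (s : String) : List String :=
  let t := PySem.Chars.strip s.toList
  let st := t.foldl pvStepB (none, [], none, 0)
  match st.2.2.1 with
  | some (ch, left) => (pvEmit st.1 st.2.1 ch (left + st.2.2.2)).2   -- the final flush of Source B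
  | none => st.2.1

-- ===== PRECONDITION & SPEC =====
-- Pre_ excludes exactly the inputs on which Python A raises ValueError (max of an
-- empty dict): strings whose strip() contains no character other than ' '.
def Pre_loneliest1 (s : String) : Prop :=
  (PySem.Chars.strip s.toList).any (fun c => c ≠ ' ') = true
instance (s : String) : Decidable (Pre_loneliest1 s) := by unfold Pre_loneliest1; infer_instance
def pvWitness_loneliest1 : String := " a  bc "

def Spec_loneliest1 (s : String) (out : List String) : Prop := out = loneliest1_alt s
instance (s : String) (out : List String) : Decidable (Spec_loneliest1 s out) := by unfold Spec_loneliest1; infer_instance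

-- ===== CLAIM (what is proved, stated in full; the proofs are below) =====
def Claim_equal_loneliest1 : Prop := ∀ (s : String), Dom_loneliest1 s → Pre_loneliest1 s → Spec_loneliest1 s (loneliest1 s)

-- ===== LEMMAS AND PROOFS =====

-- sliding windows of width 3: pvWin [x0,x1,x2,...] = [(x0,x1,x2),(x1,x2,x3),...]
def pvWin : List Int → List (Int × Int × Int)
  | a :: b :: c :: rest => (a, b, c) :: pvWin (b :: c :: rest)
  | _ => []

-- the gap and the one-char string A associates with a window (prev, cur, next)
def pvGap (w : Int × Int × Int) : Int := w.2.2 - w.1 - 2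
def pvChr (t : List Char) (w : Int × Int × Int) : String :=
  String.ofList [PySem.List.pyGetD t w.2.1 ' ']
def pvStep (t : List Char) (d : PySem.Dict Int (List String)) (w : Int × Int × Int) :
    PySem.Dict Int (List String) :=
  d.modify (pvGap w) [] (fun l => l ++ [pvChr t w])

-- the common canonical form both ports are reduced to: over the windows W of
-- (-1 :: positions ++ [len t]), the chars whose gap equals the maximal gap
def pvCanon (t : List Char) (W : List (Int × Int × Int)) : List String :=
  match PySem.List.max? (W.map pvGap) (fun g => g) with
  | some m => ((W.map (fun w => (pvChr t w, pvGap w))).filter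
      (fun p => decide (p.2 = m))).map (fun x => x.1)
  | none => []

-- ---------- A-side: loneliest1 = pvCanon ----------

-- Python list.insert(-1, v) on a list ending in z inserts just before z
lemma pv_insert_neg_one (xs : List Int) (z v : Int) :
    PySem.List.insert (xs ++ [z]) (-1) v = xs ++ [v, z] := by
  simp [PySem.List.insert, PySem.List.sliceIndices]

-- A's first loop: repeated insert(-1) builds [-1] ++ (filtered indices) ++ [z]
lemma pv_fold_insert (l : List Int) (c : Int → Prop) [DecidablePred c] (z : Int) :
    ∀ acc : List Int,
      l.foldl (fun ind i => if c i then PySem.List.insert ind (-1) i else ind)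
        ((-1 :: acc) ++ [z])
      = (-1 :: (acc ++ l.filter (fun i => decide (c i)))) ++ [z] := by
  induction l with
  | nil => intro acc; simp
  | cons x xs ih =>
    intro acc
    by_cases hc : c x
    · have h1 : PySem.List.insert ((-1 :: acc) ++ [z]) (-1) x
          = (-1 :: (acc ++ [x])) ++ [z] := by
        rw [pv_insert_neg_one (-1 :: acc) z x]; simp
      have h2 := ih (acc ++ [x])
      simp only [List.foldl_cons, hc, if_pos, List.cons_append] at h1 h2 ⊢
      rw [h1, h2]
      simp [hc, List.append_assoc]
    · have h2 := ih acc
      simp only [List.cons_append] at h2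
      simp [List.foldl_cons, hc, h2, List.append_assoc]

lemma pv_len_win : ∀ (xs : List Int), (pvWin xs).length = xs.length - 2
  | [] => rfl
  | [_] => rfl
  | [_, _] => rfl
  | a :: b :: c :: rest => by
    have := pv_len_win (b :: c :: rest)
    simp only [pvWin, List.length_cons, this]
    omega

lemma pv_getElem_win : ∀ (xs : List Int) (k : Nat) (h : k + 2 < xs.length),
    (pvWin xs)[k]'(by rw [pv_len_win]; omega)
      = (xs[k]'(by omega), xs[k+1]'(by omega), xs[k+2]'(by omega))
  | a :: b :: c :: rest, 0, h => rfl
  | a :: b :: c :: rest, (k+1), h => by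
    have hh : k + 2 < (b :: c :: rest).length := by simp at h ⊢; omega
    have := pv_getElem_win (b :: c :: rest) k hh
    simpa [pvWin] using this

lemma pv_pyRange_shift (n : Nat) : ∀ (a : Int),
    PySem.List.pyRange a (a + n) 1 = (List.range n).map (fun k : Nat => a + (k : Int)) := by
  induction n with
  | zero => intro a; simp [PySem.List.pyRange]
  | succ m ih =>
    intro a
    rw [show a + ((m + 1 : Nat) : Int) = (a + (m : Nat)) + 1 by push_cast; ring,
      PySem.List.pyRange_one_succ_right (by omega), ih a, List.range_succ]
    simp

-- A's second loop, as a fold over the windows of ind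
lemma pv_fold_range_win {D : Type} (xs : List Int) (f : D → Int × Int × Int → D) (d : D)
    (hx : 2 ≤ xs.length) :
    (PySem.List.pyRange 1 ((xs.length : Int) - 1) 1).foldl
      (fun d i => f d (PySem.List.pyGetD xs (i - 1) 0, PySem.List.pyGetD xs i 0,
                       PySem.List.pyGetD xs (i + 1) 0)) d
    = (pvWin xs).foldl f d := by
  have hr : PySem.List.pyRange 1 ((xs.length : Int) - 1) 1
      = (List.range (xs.length - 2)).map (fun k : Nat => (1 : Int) + (k : Int)) := by
    rw [show ((xs.length : Int) - 1) = 1 + ((xs.length - 2 : Nat) : Int) by omega]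
    exact pv_pyRange_shift _ 1
  rw [hr, List.foldl_map]
  have hcg : List.foldl
      (fun d (k : Nat) => f d (PySem.List.pyGetD xs ((1 : Int) + k - 1) 0,
        PySem.List.pyGetD xs ((1 : Int) + k) 0, PySem.List.pyGetD xs ((1 : Int) + k + 1) 0)) d
      (List.range (xs.length - 2))
      = List.foldl (fun d (k : Nat) => f d ((pvWin xs).getD k (0, 0, 0))) d
          (List.range (xs.length - 2)) := by
    apply PySem.List.foldl_congr_mem
    intro acc k hk
    rw [List.mem_range] at hk
    have h2 : k + 2 < xs.length := by omega
    have hklt : k < (pvWin xs).length := by rw [pv_len_win]; omega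
    rw [List.getD_eq_getElem _ _ hklt, pv_getElem_win xs k h2]
    rw [show (1 : Int) + k - 1 = ((k : Nat) : Int) by omega,
        show (1 : Int) + k = (((k+1) : Nat) : Int) by push_cast; ring,
        show (((k+1) : Nat) : Int) + 1 = (((k+2) : Nat) : Int) by push_cast; ring]
    simp only [PySem.List.pyGetD_natCast]
    rw [List.getD_eq_getElem _ _ (by omega), List.getD_eq_getElem _ _ (by omega),
        List.getD_eq_getElem _ _ (by omega)]
  rw [hcg]
  have hlen : xs.length - 2 = (pvWin xs).length := by rw [pv_len_win]
  rw [hlen]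
  rw [← List.foldl_map (f := fun k : Nat => (pvWin xs).getD k (0,0,0)) (g := f)]
  congr 1
  apply List.ext_getElem (by simp)
  intro i h1 h2
  simp [List.getElem?_eq_getElem h2]

-- grouping fold: the value stored at key k collects exactly the chars whose gap is k
lemma pv_group_getD (W : List (Int × Int × Int)) (t : List Char) (k : Int) :
    ∀ d : PySem.Dict Int (List String),
      (W.foldl (pvStep t) d).getD k []
      = d.getD k [] ++ (W.filter (fun w => decide (pvGap w = k))).map (pvChr t) := by
  induction W with
  | nil => intro d; simp
  | cons w ws ih =>
    intro d
    simp only [List.foldl_cons, ih, List.filter_cons, pvStep]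
    by_cases h : pvGap w = k
    · rw [← h]
      simp [PySem.Dict.getD_modify_self]
    · rw [PySem.Dict.getD_modify_of_ne _ _ _ (Ne.symm h)]
      simp [h]

-- the positions list, in both its forms
lemma pv_pos_eq (t : List Char) :
    ((PySem.List.enumerate t).filter (fun p => p.2 ≠ ' ')).map (·.1)
    = (PySem.List.pyRange 0 (t.length : Int) 1).filter
        (fun i => PySem.List.pyGetD t i ' ' ≠ ' ') := by
  rw [PySem.List.enumerate_eq_map_pyRange t ' ', List.filter_map]
  simp [PySem.List.len_eq, Function.comp_def]

lemma pv_pos_ne_nil (t : List Char) (h : t.any (fun c => c ≠ ' ') = true) :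
    (PySem.List.pyRange 0 (t.length : Int) 1).filter
        (fun i => PySem.List.pyGetD t i ' ' ≠ ' ') ≠ [] := by
  rw [List.any_eq_true] at h
  obtain ⟨c, hc, hne⟩ := h
  rw [List.mem_iff_getElem] at hc
  obtain ⟨j, hj, hjc⟩ := hc
  apply List.ne_nil_of_mem (a := (j : Int))
  rw [List.mem_filter]
  constructor
  · rw [PySem.List.mem_pyRange_one]; omega
  · simp only [PySem.List.pyGetD_natCast, List.getD_eq_getElem _ _ hj, hjc]
    simpa using hne

lemma pv_keys_eq (W : List (Int × Int × Int)) (t : List Char) :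
    (W.foldl (pvStep t) PySem.Dict.empty).keys = PySem.Set.update [] (W.map pvGap) := by
  have := PySem.Dict.keys_foldl_modify_key W pvGap []
    (fun _ w => fun l => l ++ [pvChr t w]) PySem.Dict.empty
  simpa [pvStep] using this

-- A's selection d[max(d)] over abstract windows is pvCanon
lemma pv_final (t : List Char) (W : List (Int × Int × Int)) (hW : W ≠ []) :
    (match PySem.List.max? (W.foldl (pvStep t) PySem.Dict.empty).keys (fun k => k) with
     | some m => (W.foldl (pvStep t) PySem.Dict.empty).getD m []
     | none => ([] : List String)) = pvCanon t W := by
  unfold pvCanon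
  have hG : W.map pvGap ≠ [] := by simpa using hW
  have hK : (W.foldl (pvStep t) PySem.Dict.empty).keys ≠ [] := by
    rw [pv_keys_eq]
    obtain ⟨g, hg⟩ := List.exists_mem_of_ne_nil _ hG
    exact List.ne_nil_of_mem ((PySem.Set.mem_update [] (W.map pvGap) g).2 (Or.inr hg))
  obtain ⟨a, ha⟩ : ∃ a, PySem.List.max? (W.foldl (pvStep t) PySem.Dict.empty).keys (fun k => k) = some a := by
    cases h : PySem.List.max? (W.foldl (pvStep t) PySem.Dict.empty).keys (fun k => k) with
    | none => exact absurd ((PySem.List.max?_eq_none_iff _ _).1 h) hK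
    | some a => exact ⟨a, rfl⟩
  obtain ⟨b, hb⟩ : ∃ b, PySem.List.max? (W.map pvGap) (fun g => g) = some b := by
    cases h : PySem.List.max? (W.map pvGap) (fun g => g) with
    | none => exact absurd ((PySem.List.max?_eq_none_iff _ _).1 h) hG
    | some b => exact ⟨b, rfl⟩
  have hmemK : ∀ x, x ∈ (W.foldl (pvStep t) PySem.Dict.empty).keys ↔ x ∈ W.map pvGap := by
    intro x
    rw [pv_keys_eq]
    simp [PySem.Set.mem_update]
  have hab : a = b := by
    have ha1 := PySem.List.max?_mem ha
    have ha2 := PySem.List.max?_isMax (key := fun k => k) ha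
    have hb1 := PySem.List.max?_mem hb
    have hb2 := PySem.List.max?_isMax (key := fun g => g) hb
    exact le_antisymm (hb2 a ((hmemK a).1 ha1)) (ha2 b ((hmemK b).2 hb1))
  rw [ha, hb, hab]
  simp only []
  rw [pv_group_getD W t b PySem.Dict.empty]
  simp [List.filter_map, Function.comp_def]

-- A reduced to the canonical form
lemma pv_A_canon (s : String)
    (hpre : (PySem.Chars.strip s.toList).any (fun c => c ≠ ' ') = true) :
    loneliest1 s
      = pvCanon (PySem.Chars.strip s.toList)
          (pvWin ((-1 : Int) ::
            ((PySem.List.pyRange 0 ((PySem.Chars.strip s.toList).length : Int) 1).filter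
              (fun i => PySem.List.pyGetD (PySem.Chars.strip s.toList) i ' ' ≠ ' ')
             ++ [((PySem.Chars.strip s.toList).length : Int)]))) := by
  simp only [loneliest1]
  set t := PySem.Chars.strip s.toList with ht
  have hind := pv_fold_insert (PySem.List.pyRange 0 (t.length : Int) 1)
      (fun i => PySem.List.pyGetD t i ' ' ≠ ' ') (t.length : Int) []
  simp only [List.nil_append, List.cons_append] at hind
  rw [hind]
  have hle : 2 ≤ ((-1 : Int) :: (List.filter (fun i => decide (PySem.List.pyGetD t i ' ' ≠ ' '))
      (PySem.List.pyRange 0 (t.length : Int) 1) ++ [(t.length : Int)])).length := by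
    simp
  rw [PySem.List.len_eq]
  have hfr := pv_fold_range_win ((-1 : Int) :: (List.filter (fun i => decide (PySem.List.pyGetD t i ' ' ≠ ' '))
      (PySem.List.pyRange 0 (t.length : Int) 1) ++ [(t.length : Int)])) (pvStep t) PySem.Dict.empty hle
  simp only [pvStep, pvGap, pvChr] at hfr
  rw [hfr]
  have hPne : (List.filter (fun i => decide (PySem.List.pyGetD t i ' ' ≠ ' '))
      (PySem.List.pyRange 0 (t.length : Int) 1)) ≠ [] := by
    have := pv_pos_ne_nil t hpre
    simpa using this
  have hWne : pvWin ((-1 : Int) :: (List.filter (fun i => decide (PySem.List.pyGetD t i ' ' ≠ ' '))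
      (PySem.List.pyRange 0 (t.length : Int) 1) ++ [(t.length : Int)])) ≠ [] := by
    apply List.ne_nil_of_length_pos
    rw [pv_len_win]
    simp only [List.length_cons, List.length_append, List.length_cons, List.length_nil]
    have : 0 < (List.filter (fun i => decide (PySem.List.pyGetD t i ' ' ≠ ' '))
        (PySem.List.pyRange 0 (t.length : Int) 1)).length := List.length_pos_of_ne_nil hPne
    omega
  rw [pv_final t _ hWne]

-- ---------- B-side: loneliest1_alt = pvCanon ----------

-- the (char, gap) pairs B's pass emits, starting from a given pending/run state
def pvPairs : List Char → Option (Char × Int) → Int → List (Char × Int)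
  | [], pending, run =>
    match pending with
    | some (ch, l) => [(ch, l + run)]
    | none => []
  | c :: u, pending, run =>
    if c = ' ' then pvPairs u pending (run + 1)
    else
      (match pending with
       | some (ch, l) => [(ch, l + run)]
       | none => ([] : List (Char × Int))) ++ pvPairs u (some (c, run)) 0

-- running-max fold over a pairs list
def pvRunMax (st : Option Int × List String) (P : List (Char × Int)) :
    Option Int × List String :=
  P.foldl (fun p q => pvEmit p.1 p.2 q.1 q.2) st

-- B's combined fold + flush = running-max fold over the emitted pairs
lemma pv_fold_eq_pairs : ∀ (u : List Char) (best : Option Int) (ws : List String)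
    (pending : Option (Char × Int)) (run : Int),
    (match (u.foldl pvStepB (best, ws, pending, run)).2.2.1 with
     | some (ch, left) =>
         (pvEmit (u.foldl pvStepB (best, ws, pending, run)).1
           (u.foldl pvStepB (best, ws, pending, run)).2.1 ch
           (left + (u.foldl pvStepB (best, ws, pending, run)).2.2.2)).2
     | none => (u.foldl pvStepB (best, ws, pending, run)).2.1)
    = (pvRunMax (best, ws) (pvPairs u pending run)).2 := by
  intro u
  induction u with
  | nil =>
    intro best ws pending run
    cases pending with
    | none => simp [pvPairs, pvRunMax]
    | some p => cases p with | mk ch l => simp [pvPairs, pvRunMax]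
  | cons c u ih =>
    intro best ws pending run
    by_cases hc : c = ' '
    · simp only [List.foldl_cons, pvStepB, hc, if_pos, pvPairs]
      exact ih best ws pending (run + 1)
    · cases pending with
      | none =>
        simp only [List.foldl_cons, pvStepB, hc, if_false, pvPairs]
        simpa [hc, pvRunMax] using ih best ws (some (c, run)) 0
      | some p =>
        cases p with
        | mk ch l =>
          simp only [List.foldl_cons, pvStepB, hc, if_false, pvPairs]
          have := ih (pvEmit best ws ch (l + run)).1 (pvEmit best ws ch (l + run)).2
            (some (c, run)) 0
          simpa [hc, pvRunMax] using this

-- width-3 windows over (prev :: positions ++ [z]), directly on enumerated pairs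
def pvWp : Int → List (Int × Char) → Int → List (Char × Int)
  | _, [], _ => []
  | prev, [(_, ch)], z => [(ch, z - prev - 2)]
  | prev, (p, ch) :: (j, d) :: rest, z => (ch, j - prev - 2) :: pvWp p ((j, d) :: rest) z

-- the filtered enumeration of u starting at index i
def pvEF : Int → List Char → List (Int × Char)
  | _, [] => []
  | i, c :: u => if c = ' ' then pvEF (i + 1) u else (i, c) :: pvEF (i + 1) u

-- run-counting emission = index-difference gaps (pending case)
lemma pv_pairs_wp_some : ∀ (u : List Char) (i prev p l r : Int) (ch : Char),
    l + r = i - prev - 2 → r = i - p - 1 →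
    pvPairs u (some (ch, l)) r = pvWp prev ((p, ch) :: pvEF i u) (i + u.length) := by
  intro u
  induction u with
  | nil =>
    intro i prev p l r ch h1 h2
    simp only [pvPairs, pvEF, pvWp, List.length_nil, Nat.cast_zero, add_zero]
    rw [h1]
  | cons c u ih =>
    intro i prev p l r ch h1 h2
    by_cases hc : c = ' '
    · simp only [pvPairs, hc, if_pos, pvEF, List.length_cons]
      rw [ih (i + 1) prev p l (r + 1) ch (by omega) (by omega)]
      congr 1
      omega
    · simp only [pvPairs, hc, if_false, pvEF, List.length_cons, List.cons_append,
        List.nil_append, pvWp]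
      have hz : i + ((u.length + 1 : Nat) : Int) = (i + 1) + (u.length : Int) := by
        push_cast; ring
      rw [hz, ← ih (i + 1) p i r 0 c (by omega) (by omega), h1]

-- run-counting emission = index-difference gaps (no pending yet: leading i spaces seen)
lemma pv_pairs_wp_none : ∀ (u : List Char) (i : Int),
    pvPairs u none i = pvWp (-1) (pvEF i u) (i + u.length) := by
  intro u
  induction u with
  | nil => intro i; simp [pvPairs, pvWp, pvEF]
  | cons c u ih =>
    intro i
    by_cases hc : c = ' '
    · simp only [pvPairs, hc, if_pos, pvEF, List.length_cons]
      rw [ih (i + 1)]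
      congr 1
      omega
    · simp only [pvPairs, hc, if_false, pvEF, List.length_cons, List.nil_append]
      rw [pv_pairs_wp_some u (i + 1) (-1) i i 0 c (by omega) (by omega)]
      congr 1
      omega

-- pvWp over enumerated pairs of t = the window pairs of A's index list
lemma pv_wp_win (t : List Char) : ∀ (E : List (Int × Char)) (prev z : Int),
    (∀ p c, (p, c) ∈ E → PySem.List.pyGetD t p ' ' = c) →
    pvWp prev E z
      = (pvWin (prev :: (E.map Prod.fst ++ [z]))).map
          (fun w => (PySem.List.pyGetD t w.2.1 ' ', pvGap w))
  | [], prev, z, _ => by simp [pvWp, pvWin]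
  | [(p, ch)], prev, z, h => by
    simp only [pvWp, List.map_cons, List.map_nil, List.cons_append, List.nil_append, pvWin,
      pvGap]
    rw [h p ch (by simp)]
  | (p, ch) :: (j, d) :: rest, prev, z, h => by
    have htail := pv_wp_win t ((j, d) :: rest) p z
      (fun a b hm => h a b (List.mem_cons_of_mem _ hm))
    simp only [pvWp, List.map_cons, List.cons_append, pvWin, pvGap] at htail ⊢
    rw [htail, h p ch (by simp)]

lemma pv_EF_eq_enum : ∀ (u : List Char) (i : Int),
    pvEF i u = (PySem.List.enumerate u i).filter (fun p => p.2 ≠ ' ') := by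
  intro u
  induction u with
  | nil => intro i; simp [pvEF, PySem.List.enumerate_nil]
  | cons c u ih =>
    intro i
    by_cases hc : c = ' ' <;>
      simp [pvEF, PySem.List.enumerate_cons, hc, ih (i + 1)]

-- members of the filtered enumeration are genuine (index, char) pairs of t
lemma pv_EF_mem (t : List Char) (p : Int) (c : Char)
    (h : (p, c) ∈ pvEF 0 t) : PySem.List.pyGetD t p ' ' = c := by
  rw [pv_EF_eq_enum, List.mem_filter] at h
  obtain ⟨hmem, _⟩ := h
  rw [PySem.List.enumerate_eq_map_pyRange t ' ', List.mem_map] at hmem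
  obtain ⟨i, _, hi⟩ := hmem
  obtain ⟨rfl, rfl⟩ := Prod.mk.injEq .. ▸ (Prod.ext_iff.1 hi.symm)
  rfl

-- converting the pair-fold of max into a plain max-fold over the gaps
lemma pv_foldl_max_conv (P : List (Char × Int)) (b : Int) :
    P.foldl (fun m q => max m q.2) b = (P.map (fun q => q.2)).foldl max b := by
  rw [List.foldl_map]

lemma pv_le_foldl (P : List (Char × Int)) (b : Int) :
    b ≤ P.foldl (fun m q => max m q.2) b := by
  rw [pv_foldl_max_conv]
  exact (PySem.List.le_foldl_max _ _).1

lemma pv_ub_foldl (P : List (Char × Int)) (b : Int) (q : Char × Int) (hq : q ∈ P) :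
    q.2 ≤ P.foldl (fun m q => max m q.2) b := by
  rw [pv_foldl_max_conv]
  exact (PySem.List.le_foldl_max _ _).2 _ (List.mem_map.2 ⟨q, hq, rfl⟩)

lemma pv_foldl_max_mem : ∀ (P : List (Char × Int)) (b : Int),
    P.foldl (fun m q => max m q.2) b = b ∨ (P.foldl (fun m q => max m q.2) b) ∈ P.map (·.2) := by
  intro P
  induction P with
  | nil => intro b; left; rfl
  | cons q P ih =>
    intro b
    rcases ih (max b q.2) with h | h
    · rcases le_total b q.2 with hq | hq
      · right
        simp only [List.foldl_cons, List.map_cons]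
        rw [h, max_eq_right hq]
        exact List.mem_cons_self ..
      · left
        simp only [List.foldl_cons]
        rw [h, max_eq_left hq]
    · right
      simp only [List.foldl_cons, List.map_cons]
      exact List.mem_cons_of_mem _ h

-- the running-max fold, characterised (some case)
lemma pv_runmax_some : ∀ (P : List (Char × Int)) (b : Int) (ws : List String),
    pvRunMax (some b, ws) P
      = (some (P.foldl (fun m q => max m q.2) b),
         (if b = P.foldl (fun m q => max m q.2) b then ws else [])
           ++ (P.filter (fun q => decide (q.2 = P.foldl (fun m q => max m q.2) b))).map
                (fun q => String.ofList [q.1])) := by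
  intro P
  induction P with
  | nil => intro b ws; simp [pvRunMax]
  | cons q P ih =>
    intro b ws
    rcases lt_trichotomy q.2 b with hlt | heq | hgt
    · have hstep : pvEmit (some b) ws q.1 q.2 = (some b, ws) := by
        simp [pvEmit, not_lt.2 (le_of_lt hlt), ne_of_lt hlt]
      have hmax : max b q.2 = b := max_eq_left (le_of_lt hlt)
      have hne : ¬ (q.2 = P.foldl (fun m q => max m q.2) b) := by
        have := pv_le_foldl P b; omega
      simp only [pvRunMax, List.foldl_cons] at ih ⊢
      rw [hstep, ih b ws]
      simp only [hmax, List.filter_cons, decide_eq_true_eq]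
      rw [if_neg hne]
    · have hstep : pvEmit (some b) ws q.1 q.2 = (some b, ws ++ [String.ofList [q.1]]) := by
        simp [pvEmit, heq]
      simp only [pvRunMax, List.foldl_cons] at ih ⊢
      rw [hstep, ih b (ws ++ [String.ofList [q.1]])]
      simp only [heq, max_self, List.filter_cons, decide_eq_true_eq]
      by_cases hb : b = P.foldl (fun m q => max m q.2) b
      · rw [if_pos hb, if_pos hb, if_pos hb]
        simp
      · rw [if_neg hb, if_neg hb, if_neg hb]
    · have hstep : pvEmit (some b) ws q.1 q.2 = (some q.2, [String.ofList [q.1]]) := by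
        simp [pvEmit, hgt]
      have hmax : max b q.2 = q.2 := max_eq_right (le_of_lt hgt)
      have hbne : ¬ (b = P.foldl (fun m q => max m q.2) q.2) := by
        have := pv_le_foldl P q.2; omega
      simp only [pvRunMax, List.foldl_cons] at ih ⊢
      rw [hstep, ih q.2 [String.ofList [q.1]]]
      simp only [hmax, List.filter_cons, decide_eq_true_eq]
      rw [if_neg hbne]
      by_cases hq : q.2 = P.foldl (fun m q => max m q.2) q.2
      · rw [if_pos hq, if_pos hq]
        simp
      · rw [if_neg hq, if_neg hq]

lemma pv_runmax_canon (P : List (Char × Int)) (hP : P ≠ []) :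
    (pvRunMax (none, []) P).2
      = (match PySem.List.max? (P.map (·.2)) (fun g => g) with
         | some m => (P.filter (fun q => decide (q.2 = m))).map (fun q => String.ofList [q.1])
         | none => ([] : List String)) := by
  obtain ⟨q, P', rfl⟩ := List.exists_cons_of_ne_nil hP
  have hstep : pvRunMax (none, []) (q :: P')
      = pvRunMax (some q.2, [String.ofList [q.1]]) P' := by
    simp [pvRunMax, pvEmit]
  rw [hstep, pv_runmax_some P' q.2 [String.ofList [q.1]]]
  set M := P'.foldl (fun m q => max m q.2) q.2 with hM
  have hMq : q.2 ≤ M := pv_le_foldl P' q.2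
  have hMmem : M ∈ (q :: P').map (·.2) := by
    rcases pv_foldl_max_mem P' q.2 with h | h
    · rw [← hM] at h
      rw [h]
      simp
    · rw [← hM] at h
      simp only [List.map_cons]
      exact List.mem_cons_of_mem _ h
  have hMub : ∀ y ∈ (q :: P').map (·.2), y ≤ M := by
    intro y hy
    rw [List.mem_map] at hy
    obtain ⟨r, hr, rfl⟩ := hy
    rcases List.mem_cons.1 hr with rfl | hmem
    · exact hMq
    · exact pv_ub_foldl P' q.2 r hmem
  obtain ⟨m, hm⟩ : ∃ m, PySem.List.max? ((q :: P').map (·.2)) (fun g => g) = some m := by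
    cases h : PySem.List.max? ((q :: P').map (·.2)) (fun g => g) with
    | none =>
      exact absurd ((PySem.List.max?_eq_none_iff _ _).1 h) (by simp)
    | some m => exact ⟨m, rfl⟩
  have hmM : m = M := by
    have h1 := PySem.List.max?_mem hm
    have h2 := PySem.List.max?_isMax (key := fun g : Int => g) hm
    exact le_antisymm (by simpa using hMub m h1) (by simpa using h2 M hMmem)
  rw [hm]
  simp only [hmM, List.filter_cons, decide_eq_true_eq]
  by_cases hq : q.2 = M
  · rw [if_pos hq, if_pos hq]
    simp
  · rw [if_neg hq, if_neg hq]
    simp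

-- B reduced to the canonical form
lemma pv_B_canon (s : String)
    (hpre : (PySem.Chars.strip s.toList).any (fun c => c ≠ ' ') = true) :
    loneliest1_alt s
      = pvCanon (PySem.Chars.strip s.toList)
          (pvWin ((-1 : Int) ::
            ((PySem.List.pyRange 0 ((PySem.Chars.strip s.toList).length : Int) 1).filter
              (fun i => PySem.List.pyGetD (PySem.Chars.strip s.toList) i ' ' ≠ ' ')
             ++ [((PySem.Chars.strip s.toList).length : Int)]))) := by
  simp only [loneliest1_alt]
  set t := PySem.Chars.strip s.toList with ht
  rw [pv_fold_eq_pairs t none [] none 0]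
  rw [pv_pairs_wp_none t 0]
  rw [pv_wp_win t (pvEF 0 t) (-1) (0 + (t.length : Int))
    (fun p c hm => pv_EF_mem t p c hm)]
  have hEfst : (pvEF 0 t).map Prod.fst
      = (PySem.List.pyRange 0 (t.length : Int) 1).filter
          (fun i => PySem.List.pyGetD t i ' ' ≠ ' ') := by
    rw [pv_EF_eq_enum t 0, ← pv_pos_eq t]
  have hz : (0 : Int) + (t.length : Int) = (t.length : Int) := by omega
  rw [hEfst, hz]
  set W := pvWin ((-1 : Int) ::
      ((PySem.List.pyRange 0 (t.length : Int) 1).filter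
        (fun i => PySem.List.pyGetD t i ' ' ≠ ' ') ++ [(t.length : Int)])) with hW
  have hPne : (PySem.List.pyRange 0 (t.length : Int) 1).filter
      (fun i => PySem.List.pyGetD t i ' ' ≠ ' ') ≠ [] := by
    have := pv_pos_ne_nil t hpre
    simpa using this
  have hWne : W ≠ [] := by
    rw [hW]
    apply List.ne_nil_of_length_pos
    rw [pv_len_win]
    simp only [List.length_cons, List.length_append, List.length_cons, List.length_nil]
    have : 0 < ((PySem.List.pyRange 0 (t.length : Int) 1).filter
        (fun i => PySem.List.pyGetD t i ' ' ≠ ' ')).length := List.length_pos_of_ne_nil hPne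
    omega
  have hmapne : W.map (fun w => (PySem.List.pyGetD t w.2.1 ' ', pvGap w)) ≠ [] := by
    simpa using hWne
  rw [pv_runmax_canon _ hmapne]
  unfold pvCanon
  have hsnd : (W.map (fun w => (PySem.List.pyGetD t w.2.1 ' ', pvGap w))).map (·.2)
      = W.map pvGap := by
    simp [List.map_map, Function.comp_def]
  rw [hsnd]
  cases PySem.List.max? (W.map pvGap) (fun g => g) with
  | none => rfl
  | some m =>
    simp [List.filter_map, List.map_map, Function.comp_def, pvChr]

-- ===== VERDICT (by name: the statement is the Claim_ definition above) =====
theorem loneliest1_spec : Claim_equal_loneliest1 := by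
  intro s _hdom hpre
  unfold Spec_loneliest1
  rw [pv_A_canon s hpre, pv_B_canon s hpre]
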